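-- pv_equiv track=rewrite | github.com/parthchauhan981104/AI_Sudoku | sudoku_gui.py | check_for_duplicates
-- ===== SOURCE A (Python) =====
-- from collections import Counter
--
-- def check_for_duplicates(l):
--     cou = Counter()
--     for c in l:
--         if c != 0:
--             cou[c] += 1
--         if c > 9 or cou[c] > 1:
--             return False
--     return True
-- ===== SOURCE B (Python) =====
-- def check_for_duplicates(l):
--     nums = [c for c in l if c != 0]
--     if any(c > 9 for c in l):
--         return False
--     return len(set(nums)) == len(nums)
-- ===== Notes on version B (the rewrite author's own statement) =====
-- stated objective: simpler
-- what changed: Replaces the single incremental Counter-and-early-exit pass with a build-then-compare decomposition: filter out zeros, reject any value > 9, then detect duplicates by comparing len(set(nums)) with len(nums).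
import Mathlib
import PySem

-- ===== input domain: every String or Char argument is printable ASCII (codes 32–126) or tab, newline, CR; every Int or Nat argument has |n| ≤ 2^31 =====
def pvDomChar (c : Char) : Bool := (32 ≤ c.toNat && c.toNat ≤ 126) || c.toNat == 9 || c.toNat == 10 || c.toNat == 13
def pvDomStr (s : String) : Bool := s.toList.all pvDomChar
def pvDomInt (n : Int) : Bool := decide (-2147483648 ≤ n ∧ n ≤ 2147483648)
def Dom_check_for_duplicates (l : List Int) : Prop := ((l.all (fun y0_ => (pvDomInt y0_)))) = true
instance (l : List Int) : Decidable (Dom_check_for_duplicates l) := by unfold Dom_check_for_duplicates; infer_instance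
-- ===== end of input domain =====

-- B replaces A's single counting pass (Counter + early exit) by a build-then-compare
-- decomposition (filter zeros, reject > 9, compare len(set) with len); objective: simpler.

-- ===== PORT A =====
-- the loop: Counter cou threaded through; early 'return False' modelled by the Bool result
def pvGoA : List Int → PySem.Dict Int Int → Bool
  | [], _ => true
  | c :: rest, cou =>
      let cou' := if c ≠ 0 then cou.modify c 0 (· + 1) else cou
      if c > 9 ∨ cou'.getD c 0 > 1 then false else pvGoA rest cou'

def check_for_duplicates (l : List Int) : Bool := pvGoA l PySem.Dict.empty

-- ===== PORT B =====
def check_for_duplicates_alt (l : List Int) : Bool :=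
  let nums := l.filter (fun c => c != 0)
  if l.any (fun c => decide (c > 9)) then false
  else decide ((PySem.Set.ofList nums).length = nums.length)

-- ===== PRECONDITION & SPEC =====
def Spec_check_for_duplicates (l : List Int) (out : Bool) : Prop := out = check_for_duplicates_alt l
instance (l : List Int) (out : Bool) : Decidable (Spec_check_for_duplicates l out) := by unfold Spec_check_for_duplicates; infer_instance

-- ===== CLAIM (what is proved, stated in full; the proofs are below) =====
def Claim_equal_check_for_duplicates : Prop := ∀ (l : List Int), Dom_check_for_duplicates l → Spec_check_for_duplicates l (check_for_duplicates l)

-- ===== LEMMAS AND PROOFS =====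

-- set(xs) (as a list of first occurrences) is a subsequence of xs
theorem pv_foldl_add_sublist (xs acc : List Int) :
    List.Sublist (xs.foldl PySem.Set.add acc) (acc ++ xs) := by
  induction xs generalizing acc with
  | nil => simp
  | cons x rest ih =>
      refine (ih (PySem.Set.add acc x)).trans ?_
      have h : List.Sublist (PySem.Set.add acc x) (acc ++ [x]) := by
        unfold PySem.Set.add
        split
        · exact (List.sublist_append_left acc [x])
        · simp
      have := h.append_right rest
      simpa using this

theorem pv_ofList_sublist (xs : List Int) :
    List.Sublist (PySem.Set.ofList xs) xs := by
  have := pv_foldl_add_sublist xs []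
  simpa [PySem.Set.ofList_eq_foldl] using this

theorem pv_set_len_iff (xs : List Int) :
    (PySem.Set.ofList xs).length = xs.length ↔ xs.Nodup := by
  constructor
  · intro h
    have := (pv_ofList_sublist xs).eq_of_length h
    exact this ▸ PySem.Set.nodup_ofList xs
  · intro h
    rw [PySem.Set.ofList_eq_self_of_nodup xs h]

-- the loop invariant: pvGoA with a nonnegative counter that has not seen 0
theorem pv_goA_iff (l : List Int) (cou : PySem.Dict Int Int)
    (hn : ∀ k, 0 ≤ cou.getD k 0) (h0 : cou.getD 0 0 = 0) :
    pvGoA l cou = true ↔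
      (∀ c ∈ l, c ≤ 9) ∧ (l.filter (fun c => c != 0)).Nodup ∧
      (∀ c ∈ l, c ≠ 0 → cou.getD c 0 = 0) := by
  induction l generalizing cou with
  | nil => simp [pvGoA]
  | cons c rest ih =>
      by_cases hc0 : c = 0
      · subst hc0
        have hite : (if (0:Int) ≠ 0 then cou.modify 0 0 (· + 1) else cou) = cou := by simp
        have hstep : pvGoA (0 :: rest) cou = pvGoA rest cou := by
          show (if (0:Int) > 9 ∨ (if (0:Int) ≠ 0 then cou.modify 0 0 (· + 1) else cou).getD 0 0 > 1 then false else pvGoA rest (if (0:Int) ≠ 0 then cou.modify 0 0 (· + 1) else cou)) = pvGoA rest cou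
          rw [hite, if_neg (by rw [h0]; decide)]
        rw [hstep, ih cou hn h0]
        constructor
        · rintro ⟨h1, h2, h3⟩
          refine ⟨?_, by simpa using h2, ?_⟩
          · intro x hx
            rcases List.mem_cons.mp hx with rfl | h
            · omega
            · exact h1 x h
          · intro x hx hxne
            rcases List.mem_cons.mp hx with rfl | h
            · omega
            · exact h3 x h hxne
        · rintro ⟨h1, h2, h3⟩
          exact ⟨fun x hx => h1 x (List.mem_cons_of_mem _ hx), by simpa using h2,
                 fun x hx hxne => h3 x (List.mem_cons_of_mem _ hx) hxne⟩
      · -- c ≠ 0 : counter incremented at c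
        set cou' := cou.modify c 0 (· + 1) with hcou'
        have hstep : pvGoA (c :: rest) cou =
            (if c > 9 ∨ cou'.getD c 0 > 1 then false else pvGoA rest cou') := by
          show (if c > 9 ∨ (if c ≠ 0 then cou.modify c 0 (· + 1) else cou).getD c 0 > 1 then false else pvGoA rest (if c ≠ 0 then cou.modify c 0 (· + 1) else cou)) = _
          rw [if_pos hc0]
        have hself : cou'.getD c 0 = cou.getD c 0 + 1 := PySem.Dict.getD_modify_self ..
        have hother : ∀ k, k ≠ c → cou'.getD k 0 = cou.getD k 0 := by
          intro k hk; exact PySem.Dict.getD_modify_of_ne _ _ _ hk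
        have hn' : ∀ k, 0 ≤ cou'.getD k 0 := by
          intro k; by_cases hk : k = c
          · subst hk; rw [hself]; have := hn k; omega
          · rw [hother k hk]; exact hn k
        have h0' : cou'.getD 0 0 = 0 := by
          rw [hother 0 (Ne.symm hc0)]; exact h0
        by_cases hbad : c > 9 ∨ cou'.getD c 0 > 1
        · rw [hstep, if_pos hbad]
          constructor
          · intro hfalse; exact absurd hfalse (by simp)
          · rintro ⟨h1, _, h3⟩
            rcases hbad with hgt | hcnt
            · exact absurd (h1 c (List.mem_cons_self)) (by omega)
            · have := h3 c (List.mem_cons_self) hc0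
              rw [hself] at hcnt; omega
        · rw [hstep, if_neg hbad]
          rw [not_or, not_lt, not_lt] at hbad
          obtain ⟨hle9, hcnt⟩ := hbad
          have hzero : cou.getD c 0 = 0 := by
            have := hn c; rw [hself] at hcnt; omega
          rw [ih cou' hn' h0']
          constructor
          · rintro ⟨h1, h2, h3⟩
            refine ⟨?_, ?_, ?_⟩
            · intro x hx
              rcases List.mem_cons.mp hx with rfl | h
              · omega
              · exact h1 x h
            · rw [List.filter_cons_of_pos (by simpa using hc0)]
              refine List.Nodup.cons ?_ h2
              intro hmem
              have hx := List.mem_of_mem_filter hmem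
              have := h3 c hx hc0
              rw [hself] at this; omega
            · intro x hx hxne
              rcases List.mem_cons.mp hx with rfl | h
              · exact hzero
              · by_cases hxc : x = c
                · subst hxc; exact hzero
                · have := h3 x h hxne; rwa [hother x hxc] at this
          · rintro ⟨h1, h2, h3⟩
            rw [List.filter_cons_of_pos (by simpa using hc0)] at h2
            have hnotmem := (List.nodup_cons.mp h2).1
            refine ⟨fun x hx => h1 x (List.mem_cons_of_mem _ hx), (List.nodup_cons.mp h2).2, ?_⟩
            intro x hx hxne
            by_cases hxc : x = c
            · subst hxc
              exact absurd (List.mem_filter.mpr ⟨hx, by simpa using hxne⟩) hnotmem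
            · rw [hother x hxc]; exact h3 x (List.mem_cons_of_mem _ hx) hxne

theorem pv_A_iff (l : List Int) :
    check_for_duplicates l = true ↔
      (∀ c ∈ l, c ≤ 9) ∧ (l.filter (fun c => c != 0)).Nodup := by
  rw [check_for_duplicates, pv_goA_iff l PySem.Dict.empty (by intro k; simp [PySem.Dict.getD]) (by simp [PySem.Dict.getD])]
  simp [PySem.Dict.getD]

theorem pv_B_iff (l : List Int) :
    check_for_duplicates_alt l = true ↔
      (∀ c ∈ l, c ≤ 9) ∧ (l.filter (fun c => c != 0)).Nodup := by
  unfold check_for_duplicates_alt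
  by_cases h : l.any (fun c => decide (c > 9))
  · rw [if_pos h]
    constructor
    · intro hf; exact absurd hf (by simp)
    · rintro ⟨h1, _⟩
      rcases List.any_eq_true.mp h with ⟨x, hx, hgt⟩
      exact absurd (h1 x hx) (by simp at hgt; omega)
  · rw [if_neg h]
    have hall : ∀ c ∈ l, c ≤ 9 := by
      intro c hc
      by_contra hgt
      exact h (List.any_eq_true.mpr ⟨c, hc, by simp; omega⟩)
    simp only [decide_eq_true_eq, pv_set_len_iff]
    exact ⟨fun hnd => ⟨hall, hnd⟩, fun ⟨_, hnd⟩ => hnd⟩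

-- ===== VERDICT (by name: the statement is the Claim_ definition above) =====
theorem check_for_duplicates_spec : Claim_equal_check_for_duplicates := by
  intro l _
  unfold Spec_check_for_duplicates
  have := (pv_A_iff l).trans (pv_B_iff l).symm
  cases hA : check_for_duplicates l <;> cases hB : check_for_duplicates_alt l <;>
    simp_all
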